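-- pv_equiv track=rewrite | github.com/pypi-data/pypi-mirror-376 | packages/music-creatingrhythms/music_creatingrhythms-0.1.0.tar.gz/music_creatingrhythms-0.1.0/src/music_creatingrhythms/music_creatingrhythms.py | pfold
-- ===== SOURCE A (Python) =====
-- def pfold(n, m, f):
--     sequence = []
--     def _oddeven(n):
--         k = 0
--         l = n & -n
--         y = (n // l - 1) // 2
--         while l > 1:
--             l >>= 1
--             k += 1
--         return k, y
--     for i in range(1, n + 1):
--         k, j = _oddeven(i)
--         k = k % m
--         y = 1 if (f & (1 << k)) else 0
--         if ((2 * j + 1) % 4 > 1):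
--             y = 1 - y
--         sequence.append(y)
--     return sequence
-- ===== SOURCE B (Python) =====
-- def pfold(n, m, f):
--     # Divide-and-conquer by parity: odd positions of the length-n sequence form a
--     # strictly alternating pattern driven by one bit of f, even positions are the
--     # same sequence for n//2 with the bit index shifted by one; interleave the two.
--     def level(n, k):
--         if n <= 0:
--             return []
--         y = (f >> (k % m)) & 1
--         rest = level(n // 2, k + 1)
--         out = []
--         for t in range((n + 1) // 2):
--             out.append(y if t % 2 == 0 else 1 - y)
--             if t < len(rest):
--                 out.append(rest[t])
--         return out
--     return level(n, 0)
-- ===== Notes on version B (the rewrite author's own statement) =====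
-- stated objective: faster
-- what changed: Replaces A's per-element trailing-zeros while-loop (computed from i & -i for each index 1..n) with a divide-and-conquer by parity: the odd positions are a strictly alternating two-value pattern driven by one bit of f, the even positions are the same sequence of length n//2 at the next bit index, and the two halves are interleaved.
import Mathlib
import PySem

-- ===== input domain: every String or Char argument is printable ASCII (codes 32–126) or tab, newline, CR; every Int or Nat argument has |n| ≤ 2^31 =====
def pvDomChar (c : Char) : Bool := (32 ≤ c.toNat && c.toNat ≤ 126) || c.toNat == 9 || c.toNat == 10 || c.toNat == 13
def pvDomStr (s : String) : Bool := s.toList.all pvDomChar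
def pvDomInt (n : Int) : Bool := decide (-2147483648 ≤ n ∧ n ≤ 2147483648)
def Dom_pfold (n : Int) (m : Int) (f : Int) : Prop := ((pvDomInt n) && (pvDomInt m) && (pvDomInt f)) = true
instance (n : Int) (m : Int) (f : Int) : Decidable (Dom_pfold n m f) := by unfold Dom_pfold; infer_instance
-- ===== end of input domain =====

-- B replaces the per-element trailing-zeros scan of A with a parity divide-and-conquer
-- (alternating odd-position pattern interleaved with the half-length sequence): an
-- alternative algorithm, proved to return the same list on all inputs where A returns.


-- ===== PORT A =====
-- the 'while l > 1: l >>= 1; k += 1' loop of _oddeven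
def pfoldWhile (l : Int) (k : Int) : Int :=
  if h : 1 < l then pfoldWhile (l >>> (1 : Nat)) (k + 1) else k
termination_by l.toNat
decreasing_by
  rw [Int.shiftRight_eq_div_pow]
  omega

-- _oddeven(n): l = n & -n, y = (n // l - 1) // 2, k from the while loop
def pfoldOddeven (i : Int) : Int × Int :=
  let l := PySem.Int.band i (-i)
  let y := PySem.Int.floordiv (PySem.Int.floordiv i l - 1) 2
  (pfoldWhile l 0, y)

-- the body of A's for-loop for one index i (k %= m; y from f's bit; conditional flip).
-- '1 << k' is ported as '(1 : Int) <<< k.toNat'; exact on Pre_, where every computed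
-- k % m is ≥ 0 (Python raises ValueError on a negative shift — outside Pre_).
def pfoldVal (m : Int) (f : Int) (i : Int) : Int :=
  let kj := pfoldOddeven i
  let k := PySem.Int.mod kj.1 m
  let y : Int := if PySem.Int.band f ((1 : Int) <<< k.toNat) ≠ 0 then 1 else 0
  if 1 < PySem.Int.mod (2 * kj.2 + 1) 4 then 1 - y else y

def pfold (n : Int) (m : Int) (f : Int) : List Int :=
  (PySem.List.pyRange 1 (n + 1) 1).foldl (fun sequence i => sequence ++ [pfoldVal m f i]) []

-- ===== PORT B =====
-- level(n, k) of Source B: odd positions alternate on bit (k % m) of f, even positions are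
-- level(n // 2, k + 1); the for-loop interleaves them.  'f >> (k % m)' is ported as
-- 'f >>> (mod k m).toNat'; exact on Pre_, where every computed k % m is ≥ 0.
def pfoldAltLevel (f : Int) (m : Int) (n : Int) (k : Int) : List Int :=
  if n ≤ 0 then []
  else
    let y := PySem.Int.band (f >>> (PySem.Int.mod k m).toNat) 1
    let rest := pfoldAltLevel f m (PySem.Int.floordiv n 2) (k + 1)
    (PySem.List.pyRange 0 (PySem.Int.floordiv (n + 1) 2) 1).foldl
      (fun out t =>
        let out2 := out ++ [if PySem.Int.mod t 2 = 0 then y else 1 - y]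
        if t < (rest.length : Int) then out2 ++ [rest.getD t.toNat 0] else out2) []
termination_by n.toNat
decreasing_by
  rw [PySem.Int.floordiv_eq_ediv_of_pos (by omega)]
  omega

def pfold_alt (n : Int) (m : Int) (f : Int) : List Int := pfoldAltLevel f m n 0

-- ===== PRECONDITION & SPEC =====
-- Exactly the inputs on which the Python A returns: A raises (ZeroDivisionError at k % 0,
-- or ValueError from a negative shift count when m < 0 makes k % m negative) whenever
-- n ≥ 1 and m = 0, or n ≥ 2 and m ≤ -2 (for n = 1 only k = 0 occurs, and m = -1 keeps
-- every k % m equal to 0).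
def Pre_pfold (n : Int) (m : Int) (f : Int) : Prop :=
  n ≤ 0 ∨ 0 < m ∨ m = -1 ∨ (n = 1 ∧ m ≠ 0)
instance (n : Int) (m : Int) (f : Int) : Decidable (Pre_pfold n m f) := by unfold Pre_pfold; infer_instance
def pvWitness_pfold : Int × Int × Int := (6, 2, 5)

def Spec_pfold (n : Int) (m : Int) (f : Int) (out : List Int) : Prop := out = pfold_alt n m f
instance (n : Int) (m : Int) (f : Int) (out : List Int) : Decidable (Spec_pfold n m f out) := by unfold Spec_pfold; infer_instance

-- ===== CLAIM (what is proved, stated in full; the proofs are below) =====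
def Claim_equal_pfold : Prop := ∀ (n : Int) (m : Int) (f : Int), Dom_pfold n m f → Pre_pfold n m f → Spec_pfold n m f (pfold n m f)

-- ===== LEMMAS AND PROOFS =====

-- Nat bit facts used for 'i & -i'
theorem pv_nat_and_odd (j : Nat) : (2 * j + 1) &&& (2 * j) = 2 * j := by
  apply Nat.eq_of_testBit_eq
  intro i
  rw [Nat.testBit_land]
  cases i with
  | zero => simp [Nat.testBit_zero]
  | succ i =>
      rw [Nat.testBit_succ, Nat.testBit_succ]
      have e1 : (2 * j + 1) / 2 = j := by omega
      have e2 : 2 * j / 2 = j := by omega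
      rw [e1, e2, Bool.and_self]

theorem pv_nat_and_even (a : Nat) (ha : 1 ≤ a) :
    (2 * a) &&& (2 * a - 1) = 2 * (a &&& (a - 1)) := by
  apply Nat.eq_of_testBit_eq
  intro i
  rw [Nat.testBit_land]
  cases i with
  | zero => simp [Nat.testBit_zero]
  | succ i =>
      rw [Nat.testBit_succ, Nat.testBit_succ, Nat.testBit_succ]
      have e1 : 2 * a / 2 = a := by omega
      have e2 : (2 * a - 1) / 2 = a - 1 := by omega
      have e3 : 2 * (a &&& (a - 1)) / 2 = a &&& (a - 1) := by omega
      rw [e1, e2, e3, ← Nat.testBit_land]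

-- 'i & -i' facts
theorem pv_band_odd (j : Int) (hj : 0 ≤ j) :
    PySem.Int.band (2 * j + 1) (-(2 * j + 1)) = 1 := by
  rw [PySem.Int.band]
  have h0 : (0 : Int) ≤ 2 * j + 1 := by omega
  have h1 : ¬ ((0:Int) ≤ -(2 * j + 1)) := by omega
  rw [if_pos h0, if_neg h1]
  have h2 : (-(-(2 * j + 1)) - 1).toNat = 2 * j.toNat := by omega
  have h3 : (2 * j + 1).toNat = 2 * j.toNat + 1 := by omega
  rw [h2, h3, pv_nat_and_odd]
  omega

theorem pv_band_pos (i : Int) (hi : 1 ≤ i) : 1 ≤ PySem.Int.band i (-i) := by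
  rw [PySem.Int.band]
  have h0 : (0 : Int) ≤ i := by omega
  have h1 : ¬ ((0:Int) ≤ -i) := by omega
  rw [if_pos h0, if_neg h1]
  have h2 : (-(-i) - 1).toNat = i.toNat - 1 := by omega
  rw [h2]
  have h3 : i.toNat &&& (i.toNat - 1) ≤ i.toNat - 1 := Nat.and_le_right
  omega

theorem pv_band_even (i : Int) (hi : 1 ≤ i) :
    PySem.Int.band (2 * i) (-(2 * i)) = 2 * PySem.Int.band i (-i) := by
  rw [PySem.Int.band, PySem.Int.band]
  have h0 : (0 : Int) ≤ 2 * i := by omega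
  have h1 : ¬ ((0:Int) ≤ -(2 * i)) := by omega
  have h0' : (0 : Int) ≤ i := by omega
  have h1' : ¬ ((0:Int) ≤ -i) := by omega
  rw [if_pos h0, if_neg h1, if_pos h0', if_neg h1']
  have h2 : (-(-(2 * i)) - 1).toNat = 2 * i.toNat - 1 := by omega
  have h3 : (2 * i).toNat = 2 * i.toNat := by omega
  have h4 : (-(-i) - 1).toNat = i.toNat - 1 := by omega
  rw [h2, h3, h4, pv_nat_and_even i.toNat (by omega)]
  have h5 : i.toNat &&& (i.toNat - 1) ≤ i.toNat - 1 := Nat.and_le_right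
  omega

-- while-loop facts
theorem pfoldWhile_base (l k : Int) (h : ¬ 1 < l) : pfoldWhile l k = k := by
  rw [pfoldWhile, dif_neg h]

theorem pfoldWhile_shift (l k : Int) : pfoldWhile l (k + 1) = pfoldWhile l k + 1 := by
  induction hN : l.toNat using Nat.strong_induction_on generalizing l k with
  | _ N ih =>
    conv_lhs => rw [pfoldWhile.eq_def]
    conv_rhs => rw [pfoldWhile.eq_def]
    by_cases h : 1 < l
    · rw [dif_pos h, dif_pos h]
      apply ih ((l >>> (1:Nat)).toNat) _ _ _ rfl
      subst hN
      rw [Int.shiftRight_eq_div_pow]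
      omega
    · rw [dif_neg h, dif_neg h]

theorem pfoldWhile_double (l k : Int) (hl : 1 ≤ l) :
    pfoldWhile (2 * l) k = pfoldWhile l k + 1 := by
  rw [pfoldWhile, dif_pos (by omega)]
  have h2 : (2 * l) >>> (1 : Nat) = l := by
    rw [Int.shiftRight_eq_div_pow]
    omega
  rw [h2, pfoldWhile_shift]

-- _oddeven on odd and even arguments
theorem pv_oddeven_odd (j : Int) (hj : 0 ≤ j) : pfoldOddeven (2 * j + 1) = (0, j) := by
  rw [pfoldOddeven]
  simp only [pv_band_odd j hj]
  rw [pfoldWhile_base _ _ (by omega)]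
  have h1 : PySem.Int.floordiv (2 * j + 1) 1 = 2 * j + 1 := by
    rw [PySem.Int.floordiv_eq_ediv_of_pos (by omega)]; omega
  rw [h1]
  have h2 : PySem.Int.floordiv (2 * j + 1 - 1) 2 = j := by
    rw [PySem.Int.floordiv_eq_ediv_of_pos (by omega)]; omega
  rw [h2]

theorem pv_oddeven_even (i : Int) (hi : 1 ≤ i) :
    pfoldOddeven (2 * i) = ((pfoldOddeven i).1 + 1, (pfoldOddeven i).2) := by
  rw [pfoldOddeven, pfoldOddeven]
  simp only
  have hband := pv_band_pos i hi
  rw [pv_band_even i hi, pfoldWhile_double _ _ hband]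
  have hdiv : PySem.Int.floordiv (2 * i) (2 * PySem.Int.band i (-i)) =
      PySem.Int.floordiv i (PySem.Int.band i (-i)) := by
    rw [PySem.Int.floordiv_eq_ediv_of_pos (by omega), PySem.Int.floordiv_eq_ediv_of_pos (by omega)]
    exact Int.mul_ediv_mul_of_pos _ _ (by omega)
  rw [hdiv]

-- A's 0/1 test of 'f & (1 << t)' equals B's '(f >> t) % 2'
theorem pv_bit_if (f : Int) (t : Nat) :
    (if PySem.Int.band f ((1 : Int) <<< t) ≠ 0 then (1 : Int) else 0) = PySem.Int.mod (f >>> t) 2 := by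
  have hpow : ((1 : Int) <<< t) = ((2 ^ t : Nat) : Int) := by
    rw [Int.shiftLeft_eq]; push_cast; ring
  rcases le_or_gt 0 f with hf | hf
  · obtain ⟨F, rfl⟩ := Int.eq_ofNat_of_zero_le hf
    rw [hpow, PySem.Int.band_natCast, Nat.and_two_pow]
    have hshift : ((F : Int) >>> t) = ((F >>> t : Nat) : Int) := by
      rw [Int.shiftRight_eq_div_pow, Nat.shiftRight_eq_div_pow]
      exact (Int.natCast_ediv F (2 ^ t)).symm
    rw [hshift, PySem.Int.mod_eq_emod_of_pos (by omega), Nat.shiftRight_eq_div_pow]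
    have hb : F.testBit t = decide (F / 2 ^ t % 2 = 1) := Nat.testBit_eq_decide_div_mod_eq
    set K := F / 2 ^ t with hK
    by_cases hbit : F.testBit t
    · have hd : K % 2 = 1 := by
        have := hb ▸ hbit
        simpa using this
      rw [if_pos]
      · omega
      · simp [hbit]
    · have hd : K % 2 = 0 := by
        have := hb ▸ hbit
        simp only [decide_eq_true_eq] at this
        omega
      rw [if_neg]
      · omega
      · simp [hbit]
  · set M : Nat := (-f - 1).toNat with hM
    rw [hpow, PySem.Int.band]
    have c1 : ¬ ((0:Int) ≤ f) := by omega
    have c2 : (0:Int) ≤ ((2 ^ t : Nat) : Int) := by positivity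
    rw [if_neg c1, if_pos c2]
    have h3 : (((2 ^ t : Nat) : Int)).toNat = 2 ^ t := by omega
    have h4 : (-f - 1).toNat = M := rfl
    rw [h3, h4, Nat.two_pow_and]
    have hshift : f >>> t = -((M >>> t : Nat) : Int) - 1 := by
      rw [Int.shiftRight_eq_div_pow, Nat.shiftRight_eq_div_pow]
      have hcast : ((M / 2 ^ t : Nat) : Int) = (M : Int) / ((2 ^ t : Nat) : Int) :=
        Int.natCast_ediv M (2 ^ t)
      have hfM : f = -(M : Int) - 1 := by omega
      rw [hfM, hcast]
      set q : Int := ((2 ^ t : Nat) : Int) with hqdef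
      have hq : 0 < q := by positivity
      set d : Int := (M : Int) / q with hd
      set r : Int := (M : Int) % q with hr
      have hdr : q * d + r = (M : Int) := Int.mul_ediv_add_emod (M : Int) q
      have hr0 : 0 ≤ r := Int.emod_nonneg _ (by omega)
      have hrq : r < q := Int.emod_lt_of_pos _ hq
      have hrewrite : -(M : Int) - 1 = (q - r - 1) + (-d - 1) * q := by
        rw [← hdr]; ring
      rw [hrewrite, Int.add_mul_ediv_right _ _ (by omega : q ≠ 0)]
      have hz : (q - r - 1) / q = 0 := Int.ediv_eq_zero_of_lt (by omega) (by omega)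
      rw [hz]
      ring
    rw [hshift, PySem.Int.mod_eq_emod_of_pos (by omega), Nat.shiftRight_eq_div_pow]
    have hb : M.testBit t = decide (M / 2 ^ t % 2 = 1) := Nat.testBit_eq_decide_div_mod_eq
    set K := M / 2 ^ t with hK
    by_cases hbit : M.testBit t
    · have hd : K % 2 = 1 := by
        have := hb ▸ hbit
        simpa using this
      rw [if_neg]
      · omega
      · simp [hbit]
    · have hd : K % 2 = 0 := by
        have := hb ▸ hbit
        simp only [decide_eq_true_eq] at this
        omega
      rw [if_pos]
      · omega
      · simp [hbit]

-- the common value function: element at 1-based position i when the level offset is c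
def pvW (m f c : Int) (i : Int) : Int :=
  let p := pfoldOddeven i
  let y := PySem.Int.mod (f >>> (PySem.Int.mod (p.1 + c) m).toNat) 2
  if 1 < PySem.Int.mod (2 * p.2 + 1) 4 then 1 - y else y

theorem pvW_zero (m f i : Int) : pvW m f 0 i = pfoldVal m f i := by
  rw [pvW, pfoldVal]
  simp only [add_zero, pv_bit_if]

theorem pvW_odd (m f c t : Int) (ht : 0 ≤ t) :
    pvW m f c (2 * t + 1) =
      if PySem.Int.mod t 2 = 0 then PySem.Int.mod (f >>> (PySem.Int.mod c m).toNat) 2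
      else 1 - PySem.Int.mod (f >>> (PySem.Int.mod c m).toNat) 2 := by
  rw [pvW, pv_oddeven_odd t ht]
  simp only [zero_add]
  have h1 : PySem.Int.mod (2 * t + 1) 4 = (2 * t + 1) % 4 := PySem.Int.mod_eq_emod_of_pos (by omega)
  have h2 : PySem.Int.mod t 2 = t % 2 := PySem.Int.mod_eq_emod_of_pos (by omega)
  rw [h1, h2]
  by_cases hpar : t % 2 = 0
  · rw [if_neg (by omega), if_pos hpar]
  · rw [if_pos (by omega), if_neg hpar]

theorem pvW_even (m f c t : Int) (ht : 1 ≤ t) :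
    pvW m f c (2 * t) = pvW m f (c + 1) t := by
  rw [pvW, pvW, pv_oddeven_even t ht]
  simp only
  have h : (pfoldOddeven t).1 + 1 + c = (pfoldOddeven t).1 + (c + 1) := by ring
  rw [h]

-- A's fold is the map of pvW at offset 0
theorem pfold_eq_map (n m f : Int) :
    pfold n m f = (PySem.List.pyRange 1 (n + 1) 1).map (pvW m f 0) := by
  rw [pfold, PySem.List.foldl_append_singleton_eq_map (pfoldVal m f), List.nil_append]
  exact (List.map_congr_left fun i _ => (pvW_zero m f i)).symm

-- core combinatorial fact over Nat ranges: a list whose 0-indexed even entries are P and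
-- odd entries are E equals the blockwise interleaving of P and E
theorem pv_core (N : Nat) (v P E : Nat → Int)
    (hP : ∀ t, v (2 * t) = P t) (hE : ∀ t, v (2 * t + 1) = E t) :
    (List.range N).map v =
      (List.range ((N + 1) / 2)).flatMap
        (fun t => [P t] ++ if t < N / 2 then [E t] else []) := by
  induction N with
  | zero => simp
  | succ N ih =>
      rw [List.range_succ, List.map_append]
      rcases Nat.even_or_odd N with ⟨s, hs⟩ | ⟨s, hs⟩
      · -- N = 2s even: one more block appears, the guards stay t < s
        have hsN : N = 2 * s := by omega
        subst hsN
        rw [show (2 * s + 1 + 1) / 2 = s + 1 from by omega,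
            show (2 * s + 1) / 2 = s from by omega]
        rw [show (2 * s + 1) / 2 = s from by omega, show 2 * s / 2 = s from by omega] at ih
        rw [ih, List.range_succ, List.flatMap_append]
        simp [hP]
      · -- N = 2s+1 odd: same blocks, the last guard becomes true
        have hsN : N = 2 * s + 1 := by omega
        subst hsN
        rw [show (2 * s + 1 + 1 + 1) / 2 = s + 1 from by omega,
            show (2 * s + 1 + 1) / 2 = s + 1 from by omega]
        rw [show (2 * s + 1 + 1) / 2 = s + 1 from by omega,
            show (2 * s + 1) / 2 = s from by omega] at ih
        rw [ih, List.range_succ, List.flatMap_append, List.flatMap_append]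
        have hfront : (List.range s).flatMap
              (fun t => [P t] ++ if t < s + 1 then [E t] else []) =
            (List.range s).flatMap
              (fun t => [P t] ++ if t < s then [E t] else []) := by
          apply List.flatMap_congr
          intro t htm
          rw [List.mem_range] at htm
          rw [if_pos (by omega), if_pos (by omega)]
        rw [hfront]
        simp [hE]

-- B's interleaving foldl, as a flatMap
theorem pv_interleave_foldl (y : Int) (rest : List Int) (q : Int) :
    (PySem.List.pyRange 0 q 1).foldl
      (fun out t =>
        if t < (rest.length : Int)
        then (out ++ [if PySem.Int.mod t 2 = 0 then y else 1 - y]) ++ [rest.getD t.toNat 0]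
        else out ++ [if PySem.Int.mod t 2 = 0 then y else 1 - y]) [] =
    (PySem.List.pyRange 0 q 1).flatMap
      (fun t => [if PySem.Int.mod t 2 = 0 then y else 1 - y] ++
        if t < (rest.length : Int) then [rest.getD t.toNat 0] else []) := by
  have hbody : (fun (out : List Int) (t : Int) =>
      if t < (rest.length : Int)
      then (out ++ [if PySem.Int.mod t 2 = 0 then y else 1 - y]) ++ [rest.getD t.toNat 0]
      else out ++ [if PySem.Int.mod t 2 = 0 then y else 1 - y]) =
      (fun (out : List Int) (t : Int) => out ++
        ([if PySem.Int.mod t 2 = 0 then y else 1 - y] ++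
          if t < (rest.length : Int) then [rest.getD t.toNat 0] else [])) := by
    funext out t
    by_cases h : t < (rest.length : Int) <;> simp [h]
  rw [hbody, PySem.List.foldl_append_eq_flatMap, List.nil_append]

-- B's level function is the map of pvW at its offset
theorem pv_level_eq_map : ∀ (N : Nat) (n : Int), n.toNat = N → ∀ (m f c : Int),
    pfoldAltLevel f m n c = (PySem.List.pyRange 1 (n + 1) 1).map (pvW m f c) := by
  intro N
  induction N using Nat.strong_induction_on with
  | _ N ih =>
    intro n hN m f c
    rw [pfoldAltLevel]
    by_cases hle : n ≤ 0
    · rw [if_pos hle, PySem.List.pyRange_one]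
      rw [show (n + 1 - 1).toNat = 0 from by omega]
      simp
    · rw [if_neg hle]
      simp only []
      have hn1 : 1 ≤ n := by omega
      have hnn : n = ((n.toNat : Nat) : Int) := by omega
      set nn : Nat := n.toNat with hdefnn
      rw [pv_interleave_foldl]
      -- the recursive call, via the induction hypothesis
      have hfd : PySem.Int.floordiv n 2 = ((nn / 2 : Nat) : Int) := by
        rw [PySem.Int.floordiv_eq_ediv_of_pos (by omega)]
        omega
      have hrec : pfoldAltLevel f m (PySem.Int.floordiv n 2) (c + 1) =
          (PySem.List.pyRange 1 (PySem.Int.floordiv n 2 + 1) 1).map (pvW m f (c + 1)) := by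
        apply ih (nn / 2) (by omega)
        rw [hfd]
        omega
      rw [hrec]
      set y : Int := PySem.Int.band (f >>> (PySem.Int.mod c m).toNat) 1 with hy
      set rest : List Int :=
        (PySem.List.pyRange 1 (PySem.Int.floordiv n 2 + 1) 1).map (pvW m f (c + 1)) with hrest
      -- lengths and bounds
      have hlenrest : rest.length = nn / 2 := by
        rw [hrest, List.length_map, PySem.List.pyRange_one, List.length_map, List.length_range]
        rw [hfd]
        omega
      have hq : PySem.Int.floordiv (n + 1) 2 = (((nn + 1) / 2 : Nat) : Int) := by
        rw [PySem.Int.floordiv_eq_ediv_of_pos (by omega)]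
        omega
      -- both ranges as Nat ranges
      rw [hq, PySem.List.pyRange_one 0, PySem.List.pyRange_one 1]
      rw [show ((((nn + 1) / 2 : Nat) : Int) - 0).toNat = (nn + 1) / 2 from by omega]
      rw [show (n + 1 - 1).toNat = nn from by omega]
      rw [List.flatMap_map, List.map_map]
      -- apply the core interleaving lemma
      have hcore := pv_core nn
        (fun j : Nat => pvW m f c (1 + (j : Int)))
        (fun t : Nat => if PySem.Int.mod (0 + (t : Int)) 2 = 0 then y else 1 - y)
        (fun t : Nat => pvW m f (c + 1) (1 + (t : Int)))
        (fun t => by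
          simp only []
          have h1 : 1 + ((2 * t : Nat) : Int) = 2 * (t : Int) + 1 := by push_cast; ring
          rw [h1, pvW_odd m f c (t : Int) (by omega)]
          rw [show (0 : Int) + (t : Int) = (t : Int) from by ring]
          rw [hy, PySem.Int.band_one])
        (fun t => by
          simp only []
          have h1 : 1 + ((2 * t + 1 : Nat) : Int) = 2 * ((t : Int) + 1) := by push_cast; ring
          rw [h1, pvW_even m f c ((t : Int) + 1) (by omega)]
          rw [show (t : Int) + 1 = 1 + (t : Int) from by ring])
      simp only [Function.comp_def] at *
      rw [hcore]
      -- identify the two flatMap block functions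
      apply List.flatMap_congr
      intro t _
      by_cases hg : t < nn / 2
      · rw [if_pos hg, if_pos (show (0 : Int) + (t : Int) < (rest.length : Int) from by
          rw [hlenrest]; push_cast; omega)]
        have htoNat : ((0 : Int) + (t : Int)).toNat = t := by omega
        rw [htoNat]
        have hlt : t < rest.length := by omega
        rw [List.getD_eq_getElem rest 0 hlt]
        have hval : rest[t] = pvW m f (c + 1) (1 + (t : Int)) := by
          simp only [hrest, List.getElem_map]
          congr 1
          rw [PySem.List.getElem_pyRange_one]
        rw [hval]
      · rw [if_neg hg, if_neg (show ¬ ((0 : Int) + (t : Int) < (rest.length : Int)) from by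
          rw [hlenrest]; push_cast; omega)]

-- ===== VERDICT (by name: the statement is the Claim_ definition above) =====
theorem pfold_spec : Claim_equal_pfold := by
  intro n m f _ _
  unfold Spec_pfold pfold_alt
  rw [pfold_eq_map, pv_level_eq_map n.toNat n rfl m f 0]
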